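-- pv_equiv track=rewrite | github.com/ranjitha/applied_crypto_project1 | AppCrypt1/Kasiski.py | englishFreqMatchScore
-- ===== SOURCE A (Python) =====
-- ETAOIN = 'etaoinshrdlcumwfgybvkjxqz'
--
-- LETTERS = ' abcdefghijklmnopqrstuvwxyz'
--
-- def getLetterCount(message):
--     # Returns a dictionary with keys of single letters and values of the
--     # count of how many times they appear in the message parameter.
--     letterCount = {'a': 0, 'b': 0, 'c': 0, 'd': 0, 'e': 0, 'f': 0, 'g': 0, 'h': 0, 'i': 0, 'j': 0, 'k': 0, 'l': 0, 'm': 0, 'n': 0, 'o': 0, 'p': 0, 'q': 0, 'r': 0, 's': 0, 't': 0, 'u': 0, 'v': 0, 'w': 0, 'x': 0, 'y': 0, 'z': 0, ' ':0}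
--
--     for letter in message.lower():
--         if letter in LETTERS:
--             letterCount[letter] += 1
--
--     return letterCount
--
-- def getItemAtIndexZero(x):
--     return x[0]
--
-- def getFrequencyOrder(message):
--     # Returns a string of the alphabet letters arranged in order of most
--     # frequently occurring in the message parameter.
--
--     # first, get a dictionary of each letter and its frequency count
--     letterToFreq = getLetterCount(message)
--
--     # second, make a dictionary of each frequency count to each letter(s)
--     # with that frequency
--     freqToLetter = {}
--     for letter in LETTERS:
--         if letterToFreq[letter] not in freqToLetter:
--             freqToLetter[letterToFreq[letter]] = [letter]
--         else:
--             freqToLetter[letterToFreq[letter]].append(letter)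
--
--     # third, put each list of letters in reverse "ETAOIN" order, and then
--     # convert it to a string
--     for freq in freqToLetter:
--         freqToLetter[freq].sort(key=ETAOIN.find, reverse=True)
--         freqToLetter[freq] = ''.join(freqToLetter[freq])
--
--     # fourth, convert the freqToLetter dictionary to a list of tuple
--     # pairs (key, value), then sort them
--     freqPairs = list(freqToLetter.items())
--     freqPairs.sort(key=getItemAtIndexZero, reverse=True)
--
--     # fifth, now that the letters are ordered by frequency, extract all
--     # the letters for the final string
--     freqOrder = []
--     for freqPair in freqPairs:
--         freqOrder.append(freqPair[1])
--
--     return ''.join(freqOrder)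
--
-- def englishFreqMatchScore(message):
--     # Return the number of matches that the string in the message
--     # parameter has when its letter frequency is compared to English
--     # letter frequency. A "match" is how many of its six most frequent
--     # and six least frequent letters is among the six most frequent and
--     # six least frequent letters for English.
--     freqOrder = getFrequencyOrder(message)
--
--     matchScore = 0
--     # Find how many matches for the six most common letters there are.
--     for commonLetter in ETAOIN[:6]:
--         if commonLetter in freqOrder[:6]:
--             matchScore += 1
--     # Find how many matches for the six least common letters there are.
--     for uncommonLetter in ETAOIN[-6:]:
--         if uncommonLetter in freqOrder[-6:]:
--             matchScore += 1
--
--     return matchScore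
-- ===== SOURCE B (Python) =====
-- ETAOIN = 'etaoinshrdlcumwfgybvkjxqz'
--
-- LETTERS = ' abcdefghijklmnopqrstuvwxyz'
--
-- def englishFreqMatchScore(message):
--     # Count each of the 27 tracked characters directly, then obtain the
--     # frequency order with one composite-key sort instead of bucketing.
--     m = message.lower()
--     freqOrder = ''.join(sorted(LETTERS,
--                                key=lambda c: (m.count(c), ETAOIN.find(c)),
--                                reverse=True))
--     return (len(set(ETAOIN[:6]) & set(freqOrder[:6]))
--             + len(set(ETAOIN[-6:]) & set(freqOrder[-6:])))
-- ===== Notes on version B (the rewrite author's own statement) =====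
-- stated objective: simpler
-- what changed: B drops A's count-to-letters bucket dictionary, per-bucket sorts and pair sort, producing the frequency order with a single composite-key sort (count, ETAOIN rank) over the 27 tracked characters (counting via str.count), and computes the match score with set intersections instead of counting loops.
import Mathlib
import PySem

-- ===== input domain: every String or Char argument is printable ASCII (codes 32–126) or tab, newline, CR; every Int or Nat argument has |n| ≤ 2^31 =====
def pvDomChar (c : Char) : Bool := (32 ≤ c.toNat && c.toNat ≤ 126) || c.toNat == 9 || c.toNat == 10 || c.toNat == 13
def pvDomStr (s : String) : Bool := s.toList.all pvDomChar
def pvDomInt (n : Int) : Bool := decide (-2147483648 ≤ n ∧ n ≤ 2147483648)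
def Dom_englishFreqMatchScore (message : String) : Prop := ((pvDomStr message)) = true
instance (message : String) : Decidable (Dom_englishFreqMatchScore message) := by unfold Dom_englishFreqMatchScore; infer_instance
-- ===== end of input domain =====

-- B replaces A's frequency-bucket dictionary and three-stage ordering by one composite-key sort
-- of the 27 tracked characters plus set intersections for the score (objective: simpler).

-- ===== PORT A =====
def pyEtaoin : List Char := "etaoinshrdlcumwfgybvkjxqz".toList

def pyLetters : List Char := " abcdefghijklmnopqrstuvwxyz".toList

-- ETAOIN.find(c) for a single character c
def pyEtaoinFind (c : Char) : Int := PySem.Chars.find pyEtaoin [c]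

def pyGetLetterCount (message : String) : PySem.Dict Char Int :=
  let letterCount : PySem.Dict Char Int := PySem.Dict.ofList
    [('a',0),('b',0),('c',0),('d',0),('e',0),('f',0),('g',0),('h',0),('i',0),('j',0),
     ('k',0),('l',0),('m',0),('n',0),('o',0),('p',0),('q',0),('r',0),('s',0),('t',0),
     ('u',0),('v',0),('w',0),('x',0),('y',0),('z',0),(' ',0)]
  -- 'letter in LETTERS' on a single character is exactly list membership
  (PySem.Str.lower message).toList.foldl
    (fun d letter => if pyLetters.contains letter then d.insert letter (d.getD letter 0 + 1) else d)
    letterCount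

def pyGetFrequencyOrder (message : String) : List Char :=
  let letterToFreq := pyGetLetterCount message
  let freqToLetter : PySem.Dict Int (List Char) :=
    pyLetters.foldl (fun d letter =>
      if d.contains (letterToFreq.getD letter 0) = false
      then d.insert (letterToFreq.getD letter 0) [letter]
      else d.insert (letterToFreq.getD letter 0)
             (d.getD (letterToFreq.getD letter 0) [] ++ [letter]))
      PySem.Dict.empty
  -- third loop: sort each value list in reverse ETAOIN order (the ''.join of each
  -- value is kept as a List Char; the final result is the join of all of them)
  let freqToLetter2 : PySem.Dict Int (List Char) :=
    PySem.Dict.mk (freqToLetter.items.map (fun p => (p.1, PySem.List.sorted p.2 pyEtaoinFind true)))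
  let freqPairs := PySem.List.sorted freqToLetter2.items (fun p => p.1) true
  let freqOrder := freqPairs.foldl (fun acc p => acc ++ [p.2]) []
  freqOrder.flatten

def englishFreqMatchScore (message : String) : Int :=
  let freqOrder := pyGetFrequencyOrder message
  -- 'c in freqOrder[:6]' on single characters is list membership
  let s1 := (PySem.List.slice pyEtaoin none (some 6)).foldl
    (fun acc c => if (PySem.List.slice freqOrder none (some 6)).contains c then acc + 1 else acc) 0
  (PySem.List.slice pyEtaoin (some (-6)) none).foldl
    (fun acc c => if (PySem.List.slice freqOrder (some (-6)) none).contains c then acc + 1 else acc) s1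

-- ===== PORT B =====
def englishFreqMatchScore_alt (message : String) : Int :=
  let m := (PySem.Str.lower message).toList
  let freqOrder := PySem.List.sorted2 pyLetters
    (fun c => PySem.Chars.count m [c]) pyEtaoinFind true
  ((PySem.Set.inter (PySem.Set.ofList (PySem.List.slice pyEtaoin none (some 6)))
      (PySem.Set.ofList (PySem.List.slice freqOrder none (some 6)))).length : Int)
  + ((PySem.Set.inter (PySem.Set.ofList (PySem.List.slice pyEtaoin (some (-6)) none))
      (PySem.Set.ofList (PySem.List.slice freqOrder (some (-6)) none))).length : Int)

-- ===== PRECONDITION & SPEC =====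
def Spec_englishFreqMatchScore (message : String) (out : Int) : Prop := out = englishFreqMatchScore_alt message
instance (message : String) (out : Int) : Decidable (Spec_englishFreqMatchScore message out) := by unfold Spec_englishFreqMatchScore; infer_instance

-- ===== CLAIM (what is proved, stated in full; the proofs are below) =====
def Claim_equal_englishFreqMatchScore : Prop := ∀ (message : String), Dom_englishFreqMatchScore message → Spec_englishFreqMatchScore message (englishFreqMatchScore message)

-- ===== LEMMAS AND PROOFS =====

-- ETAOIN.find is not injective on LETTERS (' ' and 'p' are both -1); pvFind2 doubles it and
-- breaks that single tie in favour of ' ', which both stable sorts place first (LETTERS order).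
def pvFind2 (c : Char) : Int := 2 * (pyEtaoinFind c + 1) + (if c = ' ' then 1 else 0)

-- the composite key both orderings realise: frequency first, then tie-broken ETAOIN rank
def pvKey (m : List Char) (c : Char) : Int := 52 * (m.count c : Int) + pvFind2 c

-- ---- small facts about ETAOIN.find on the 27 letters, read off a table computed once ----

theorem pv_table : pyLetters.map (fun c => (c, pyEtaoinFind c)) =
    [(' ',-1),('a',2),('b',18),('c',11),('d',9),('e',0),('f',15),('g',16),('h',7),('i',4),
     ('j',21),('k',20),('l',10),('m',13),('n',5),('o',3),('p',-1),('q',23),('r',8),('s',6),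
     ('t',1),('u',12),('v',19),('w',14),('x',22),('y',17),('z',24)] := by rfl

theorem pv_find_mem (c : Char) (hc : c ∈ pyLetters) : -1 ≤ pyEtaoinFind c ∧ pyEtaoinFind c ≤ 24 := by
  have h : (c, pyEtaoinFind c) ∈ pyLetters.map (fun c => (c, pyEtaoinFind c)) :=
    List.mem_map_of_mem hc
  rw [pv_table] at h
  have : ∀ p ∈ [((' ' : Char),(-1 : Int)),('a',2),('b',18),('c',11),('d',9),('e',0),('f',15),('g',16),('h',7),('i',4),
     ('j',21),('k',20),('l',10),('m',13),('n',5),('o',3),('p',-1),('q',23),('r',8),('s',6),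
     ('t',1),('u',12),('v',19),('w',14),('x',22),('y',17),('z',24)], -1 ≤ p.2 ∧ p.2 ≤ 24 := by decide
  exact this _ h

theorem pv_find2_mem (c : Char) (hc : c ∈ pyLetters) : 0 ≤ pvFind2 c ∧ pvFind2 c ≤ 51 := by
  have h := pv_find_mem c hc
  unfold pvFind2
  split_ifs <;> omega

-- any earlier-vs-later pair of distinct letters has distinct find values, except (' ', 'p')
theorem pv_pairwise_cases : pyLetters.Pairwise (fun y x =>
    pyEtaoinFind y < pyEtaoinFind x ∨ pyEtaoinFind x < pyEtaoinFind y ∨ (y = ' ' ∧ x = 'p')) := by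
  have h : (pyLetters.map (fun c => (c, pyEtaoinFind c))).Pairwise
      (fun p q => p.2 < q.2 ∨ q.2 < p.2 ∨ (p.1 = ' ' ∧ q.1 = 'p')) := by
    rw [pv_table]; decide
  exact (List.pairwise_map.mp h)

theorem pv_find2_inj : ∀ a ∈ pyLetters, ∀ b ∈ pyLetters, pvFind2 a = pvFind2 b → a = b := by
  have hmap : pyLetters.map pvFind2
      = (pyLetters.map (fun c => (c, pyEtaoinFind c))).map
          (fun p => 2 * (p.2 + 1) + (if p.1 = ' ' then 1 else 0)) := by
    rw [List.map_map]; rfl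
  have hnd : (pyLetters.map pvFind2).Nodup := by
    rw [hmap, pv_table]; decide
  exact fun a ha b hb => List.inj_on_of_nodup_map hnd ha hb

theorem pv_letters_nodup : pyLetters.Nodup := by decide

theorem pv_find2_mono {y x : Char} (h : pyEtaoinFind y < pyEtaoinFind x) : pvFind2 y < pvFind2 x := by
  unfold pvFind2; split_ifs <;> omega

-- ---- str.count with a single-character needle is List.count ----

theorem pv_go_singleton (c : Char) : ∀ (l : List Char) (fuel acc : Nat), l.length ≤ fuel →
    PySem.Chars.count.go [c] fuel l acc = acc + l.count c := by
  intro l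
  induction l with
  | nil => intro fuel acc _; cases fuel <;> simp [PySem.Chars.count.go]
  | cons h t ih =>
    intro fuel acc hle
    cases fuel with
    | zero => simp at hle
    | succ n =>
      have hlen : t.length ≤ n := by simpa using hle
      simp only [PySem.Chars.count.go]
      by_cases hc : c = h
      · subst hc
        simp only [List.isPrefixOf, BEq.rfl, Bool.true_and, if_true, List.length_cons,
          List.drop_succ_cons, List.length_nil, List.drop_zero]
        rw [ih _ _ hlen]
        simp
        omega
      · have hp : [c].isPrefixOf (h :: t) = false := by
          simp [List.isPrefixOf, hc]
        rw [hp]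
        simp only [Bool.false_eq_true, if_false]
        rw [ih _ _ hlen]
        simp [Ne.symm hc]

theorem pv_count_singleton (l : List Char) (c : Char) : PySem.Chars.count l [c] = l.count c := by
  simp [PySem.Chars.count, pv_go_singleton c l l.length 0 le_rfl]

-- ---- the counting dictionary of A delivers exactly List.count on the 27 letters ----

theorem pv_getD_zero_of_all_zero (l : List (Char × Int)) (hl : ∀ p ∈ l, p.2 = 0) (c : Char) :
    (PySem.Dict.mk l).getD c 0 = 0 := by
  induction l with
  | nil => rfl
  | cons p t ih =>
    rw [PySem.Dict.getD_eq_get?_getD, PySem.Dict.get?_mk_cons]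
    by_cases h : p.1 == c
    · simp [h, hl p (by simp)]
    · simp only [h, Bool.false_eq_true, if_false]
      rw [← PySem.Dict.getD_eq_get?_getD]
      exact ih (fun q hq => hl q (by simp [hq]))

theorem pv_letterCount_getD_gen (ml : List Char) (c : Char) (hc : c ∈ pyLetters) :
    (ml.foldl
      (fun d letter => if pyLetters.contains letter then d.insert letter (d.getD letter 0 + 1) else d)
      (PySem.Dict.ofList
        [('a',0),('b',0),('c',0),('d',0),('e',0),('f',0),('g',0),('h',0),('i',0),('j',0),
         ('k',0),('l',0),('m',0),('n',0),('o',0),('p',0),('q',0),('r',0),('s',0),('t',0),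
         ('u',0),('v',0),('w',0),('x',0),('y',0),('z',0),(' ',0)])).getD c 0
    = (ml.count c : Int) := by
  rw [PySem.List.foldl_if_eq_foldl_filter]
  rw [PySem.Dict.getD_foldl_insert_add_one]
  have hmk : (PySem.Dict.ofList
      [(('a' : Char),(0 : Int)),('b',0),('c',0),('d',0),('e',0),('f',0),('g',0),('h',0),('i',0),('j',0),
       ('k',0),('l',0),('m',0),('n',0),('o',0),('p',0),('q',0),('r',0),('s',0),('t',0),
       ('u',0),('v',0),('w',0),('x',0),('y',0),('z',0),(' ',0)])
      = PySem.Dict.mk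
      [('a',0),('b',0),('c',0),('d',0),('e',0),('f',0),('g',0),('h',0),('i',0),('j',0),
       ('k',0),('l',0),('m',0),('n',0),('o',0),('p',0),('q',0),('r',0),('s',0),('t',0),
       ('u',0),('v',0),('w',0),('x',0),('y',0),('z',0),(' ',0)] := by rfl
  rw [hmk, pv_getD_zero_of_all_zero _ (by decide) c]
  rw [List.count_filter (by simpa using hc)]
  ring

theorem pv_letterCount_getD (message : String) (c : Char) (hc : c ∈ pyLetters) :
    (pyGetLetterCount message).getD c 0 = ((PySem.Str.lower message).toList.count c : Int) :=
  pv_letterCount_getD_gen (PySem.Str.lower message).toList c hc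

-- ---- generic helper lemmas ----

theorem pv_sum_ite (ks : List Int) (y : Int) (n : Nat) :
    (ks.map (fun v => if y = v then n else 0)).sum = n * ks.count y := by
  induction ks with
  | nil => simp
  | cons k t ih =>
    simp only [List.map_cons, List.sum_cons, ih, List.count_cons]
    by_cases h : y = k
    · subst h; simp [Nat.mul_add]; omega
    · simp [h, Ne.symm h]

theorem pv_flatten_perm {α β : Type} (ks : List α) (S G : α → List β)
    (h : ∀ v, (S v).Perm (G v)) : ((ks.map S).flatten).Perm ((ks.map G).flatten) := by
  induction ks with
  | nil => rfl
  | cons k t ih =>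
    simp only [List.map_cons, List.flatten_cons]
    exact (h k).append ih

theorem pv_insertBy_congr {α : Type} (before before' : α → α → Bool) (x : α) :
    ∀ (ys : List α), (∀ y ∈ ys, before x y = before' x y) →
    PySem.List.insertBy before x ys = PySem.List.insertBy before' x ys := by
  intro ys
  induction ys with
  | nil => intro _; rfl
  | cons y t ih =>
    intro h
    simp only [PySem.List.insertBy]
    rw [h y (by simp)]
    by_cases hb : before' x y = true
    · simp [hb]
    · simp only [Bool.not_eq_true] at hb
      simp [hb, ih (fun z hz => h z (by simp [hz]))]

-- insertion sorts with comparisons that agree on every (later element, earlier element)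
-- pair produce the same list
theorem pv_foldl_insertBy_congr {α : Type} (before before' : α → α → Bool) :
    ∀ (xs acc : List α),
    (∀ x ∈ xs, ∀ y ∈ acc, before x y = before' x y) →
    xs.Pairwise (fun y x => before x y = before' x y) →
    xs.foldl (fun acc x => PySem.List.insertBy before x acc) acc
      = xs.foldl (fun acc x => PySem.List.insertBy before' x acc) acc := by
  intro xs
  induction xs with
  | nil => intro acc _ _; rfl
  | cons x t ih =>
    intro acc hacc hpw
    simp only [List.foldl_cons]
    rw [pv_insertBy_congr before before' x acc (hacc x (by simp))]
    have hpw' := List.pairwise_cons.mp hpw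
    apply ih
    · intro x' hx' y hy
      rw [PySem.List.insertBy_mem_iff] at hy
      rcases hy with rfl | hy
      · exact hpw'.1 x' hx'
      · exact hacc x' (by simp [hx']) y hy
    · exact hpw'.2

-- ---- B's tuple-key sort realises the single integer key pvKey ----

theorem pv_before_eq (m : List Char) (y x : Char) (hy : y ∈ pyLetters) (hx : x ∈ pyLetters)
    (hcase : pyEtaoinFind y < pyEtaoinFind x ∨ pyEtaoinFind x < pyEtaoinFind y ∨ (y = ' ' ∧ x = 'p')) :
    (decide (m.count y < m.count x) ||
      (!decide (m.count x < m.count y) && decide (pyEtaoinFind y < pyEtaoinFind x)))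
    = decide (pvKey m y < pvKey m x) := by
  have h2y := pv_find2_mem y hy
  have h2x := pv_find2_mem x hx
  have hfy := pv_find_mem y hy
  have hfx := pv_find_mem x hx
  unfold pvKey
  rcases Nat.lt_trichotomy (m.count y) (m.count x) with h | h | h
  · have : (m.count y : Int) < m.count x := by exact_mod_cast h
    simp [h]
    omega
  · have hns : ¬ m.count x < m.count y := by omega
    have hf2 : (pyEtaoinFind y < pyEtaoinFind x) ↔ pvFind2 y < pvFind2 x := by
      rcases hcase with hc | hc | ⟨rfl, rfl⟩
      · exact ⟨fun _ => pv_find2_mono hc, fun _ => hc⟩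
      · constructor
        · intro h'; omega
        · intro h'; exact absurd (pv_find2_mono hc) (by omega)
      · simp [pvFind2, pyEtaoinFind]
        decide
    simp only [h, lt_irrefl, decide_false, Bool.false_or, Bool.not_false, Bool.true_and]
    by_cases hlt : pyEtaoinFind y < pyEtaoinFind x
    · have h2 : 52 * (m.count x : Int) + pvFind2 y < 52 * (m.count x : Int) + pvFind2 x := by
        have := hf2.mp hlt; omega
      simp [hlt, h2]
    · have h2 : ¬ (52 * (m.count x : Int) + pvFind2 y < 52 * (m.count x : Int) + pvFind2 x) := by
        have : ¬ pvFind2 y < pvFind2 x := fun hh => hlt (hf2.mpr hh)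
        omega
      simp [hlt, h2]
  · have : (m.count x : Int) < m.count y := by exact_mod_cast h
    have h1 : ¬ m.count y < m.count x := by omega
    simp [h, h1]
    omega

theorem pv_sorted2_eq (m : List Char) :
    PySem.List.sorted2 pyLetters (fun c => PySem.Chars.count m [c]) pyEtaoinFind true
      = PySem.List.sorted pyLetters (pvKey m) true := by
  simp only [PySem.List.sorted2, PySem.List.sorted, reduceIte]
  apply pv_foldl_insertBy_congr
  · intro x _ y hy; simp at hy
  · apply List.Pairwise.imp_of_mem _ pv_pairwise_cases
    intro y x hy hx hcase
    simpa [pv_count_singleton] using pv_before_eq m y x hy hx hcase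

-- ---- A's grouping dictionary, characterised ----

theorem pv_hpairs (f : Char → Int) :
    (pyLetters.foldl (fun d c => d.modify (f c) [] (· ++ [c])) PySem.Dict.empty)
      = ((pyLetters.map (fun c => (f c, c))).foldl
          (fun d p => d.modify p.1 [] (· ++ [p.2])) PySem.Dict.empty) :=
  (List.foldl_map (f := fun c => ((f c, c) : Int × Char))
    (g := fun d p => d.modify p.1 [] (· ++ [p.2])) (l := pyLetters)
    (init := PySem.Dict.empty)).symm

theorem pv_hkeys (f : Char → Int) :
    (pyLetters.foldl (fun d c => d.modify (f c) [] (· ++ [c])) PySem.Dict.empty).keys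
      = PySem.Set.ofList (pyLetters.map f) := by
  rw [PySem.Dict.keys_foldl_modify_key pyLetters f [] (fun d x => (· ++ [x])) PySem.Dict.empty]
  rw [PySem.Set.ofList_eq_foldl, PySem.Set.update, PySem.Dict.keys_empty]

theorem pv_hnd (f : Char → Int) :
    (pyLetters.foldl (fun d c => d.modify (f c) [] (· ++ [c])) PySem.Dict.empty).keys.Nodup :=
  PySem.Dict.nodup_keys_foldl_modify_key pyLetters f [] (fun d x => (· ++ [x])) PySem.Dict.empty
    (by simp [PySem.Dict.keys_empty])

theorem pv_hgetD (f : Char → Int) (v : Int) :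
    ((pyLetters.map (fun c => (f c, c))).foldl
        (fun d p => d.modify p.1 [] (· ++ [p.2])) PySem.Dict.empty).getD v []
      = pyLetters.filter (fun c => f c == v) := by
  rw [PySem.Dict.getD_foldl_modify_append]
  rw [List.filter_map, List.map_map]
  simp [Function.comp_def]

theorem pv_hgetD' (f : Char → Int) (v : Int) :
    (pyLetters.foldl (fun d c => d.modify (f c) [] (· ++ [c])) PySem.Dict.empty).getD v []
      = pyLetters.filter (fun c => f c == v) := by
  rw [pv_hpairs f]
  exact pv_hgetD f v

theorem pv_buckets_items (f : Char → Int) :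
    (pyLetters.foldl (fun d c => d.modify (f c) [] (· ++ [c])) PySem.Dict.empty).items
      = (PySem.Set.ofList (pyLetters.map f)).map
          (fun v => (v, pyLetters.filter (fun c => f c == v))) := by
  rw [PySem.Dict.items_eq_map_keys _ (pv_hnd f) []]
  rw [pv_hkeys]
  apply List.map_congr_left
  intro v _
  rw [pv_hgetD' f v]

-- ---- the concatenation of the sorted buckets is the pvKey-sorted letter list ----

theorem pv_K'_strict (f : Char → Int) :
    (PySem.List.sorted (PySem.Set.ofList (pyLetters.map f)) (fun v => v) true).Pairwise
      (fun a b => b < a) := by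
  have hle := PySem.List.sorted_pairwise_rev (PySem.Set.ofList (pyLetters.map f)) (fun v => v)
  have hnd : (PySem.List.sorted (PySem.Set.ofList (pyLetters.map f)) (fun v => v) true).Nodup :=
    ((PySem.List.sorted_perm (PySem.Set.ofList (pyLetters.map f)) (fun v => v) true).nodup_iff).mpr
      (PySem.Set.nodup_ofList _)
  exact (hle.and hnd).imp (fun h => lt_of_le_of_ne h.1 (Ne.symm h.2))

theorem pv_S_eq (l : List Char) (hsub : l.Sublist pyLetters) :
    PySem.List.sorted l pyEtaoinFind true = PySem.List.sorted l pvFind2 true := by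
  simp only [PySem.List.sorted, reduceIte]
  apply pv_foldl_insertBy_congr
  · intro x _ y hy; simp at hy
  · refine List.Pairwise.sublist hsub ?_
    apply List.Pairwise.imp_of_mem _ pv_pairwise_cases
    intro y x _ _ hcase
    rcases hcase with hc | hc | ⟨rfl, rfl⟩
    · simp [hc, pv_find2_mono hc]
    · have h1 : ¬ pyEtaoinFind y < pyEtaoinFind x := by omega
      have h2 : ¬ pvFind2 y < pvFind2 x := by have := pv_find2_mono hc; omega
      simp [h1, h2]
    · simp [pvFind2, pyEtaoinFind]
      decide

theorem pv_S_pairwise (f : Char → Int) (v : Int) :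
    (PySem.List.sorted (pyLetters.filter (fun c => f c == v)) pyEtaoinFind true).Pairwise
      (fun a b => (52 * f b + pvFind2 b) < (52 * f a + pvFind2 a)) := by
  rw [pv_S_eq _ List.filter_sublist]
  have hle := PySem.List.sorted_pairwise_rev (pyLetters.filter (fun c => f c == v)) pvFind2
  have hnd : (PySem.List.sorted (pyLetters.filter (fun c => f c == v)) pvFind2 true).Nodup :=
    ((PySem.List.sorted_perm (pyLetters.filter (fun c => f c == v)) pvFind2 true).nodup_iff).mpr
      (pv_letters_nodup.filter _)
  apply List.Pairwise.imp_of_mem _ (hle.and hnd)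
  intro a b ha hb hab
  rw [PySem.List.mem_sorted] at ha hb
  have ha' := List.mem_filter.mp ha
  have hb' := List.mem_filter.mp hb
  have hfa : f a = v := by simpa using ha'.2
  have hfb : f b = v := by simpa using hb'.2
  have hne : pvFind2 b ≠ pvFind2 a :=
    fun h => hab.2 ((pv_find2_inj b hb'.1 a ha'.1 h).symm)
  have : pvFind2 b < pvFind2 a := lt_of_le_of_ne hab.1 hne
  omega

theorem pv_flatten_pairwise (f : Char → Int) :
    (((PySem.List.sorted (PySem.Set.ofList (pyLetters.map f)) (fun v => v) true).map
        (fun v => PySem.List.sorted (pyLetters.filter (fun c => f c == v)) pyEtaoinFind true)).flatten).Pairwise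
      (fun a b => (52 * f b + pvFind2 b) < (52 * f a + pvFind2 a)) := by
  rw [List.pairwise_flatten]
  constructor
  · intro l hl
    obtain ⟨v, _, rfl⟩ := List.mem_map.mp hl
    exact pv_S_pairwise f v
  · rw [List.pairwise_map]
    refine (pv_K'_strict f).imp (fun {v w} hwv a ha b hb => ?_)
    rw [PySem.List.mem_sorted] at ha hb
    have ha' := List.mem_filter.mp ha
    have hb' := List.mem_filter.mp hb
    have hfa : f a = v := by simpa using ha'.2
    have hfb : f b = w := by simpa using hb'.2
    have h2a := pv_find2_mem a ha'.1
    have h2b := pv_find2_mem b hb'.1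
    omega

theorem pv_flatten_perm_letters (f : Char → Int) :
    ((((PySem.List.sorted (PySem.Set.ofList (pyLetters.map f)) (fun v => v) true).map
        (fun v => PySem.List.sorted (pyLetters.filter (fun c => f c == v)) pyEtaoinFind true)).flatten)).Perm
      pyLetters := by
  have h1 := pv_flatten_perm (PySem.List.sorted (PySem.Set.ofList (pyLetters.map f)) (fun v => v) true)
    (fun v => PySem.List.sorted (pyLetters.filter (fun c => f c == v)) pyEtaoinFind true)
    (fun v => pyLetters.filter (fun c => f c == v))
    (fun v => PySem.List.sorted_perm _ _ _)
  refine h1.trans ?_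
  rw [List.perm_iff_count]
  intro x
  rw [List.count_flatten, List.map_map]
  have hmapc : ((PySem.List.sorted (PySem.Set.ofList (pyLetters.map f)) (fun v => v) true).map
        ((fun l => List.count x l) ∘ (fun v => pyLetters.filter (fun c => f c == v))))
      = ((PySem.List.sorted (PySem.Set.ofList (pyLetters.map f)) (fun v => v) true).map
        (fun v => if f x = v then pyLetters.count x else 0)) := by
    apply List.map_congr_left
    intro v _
    simp only [Function.comp_def]
    by_cases hfx : f x = v
    · rw [if_pos hfx]
      exact List.count_filter (by simpa using hfx)
    · rw [if_neg hfx]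
      refine List.count_eq_zero_of_not_mem ?_
      intro hmem
      exact hfx (by simpa using (List.mem_filter.mp hmem).2)
  rw [hmapc, pv_sum_ite]
  by_cases hx : x ∈ pyLetters
  · have hmemK : f x ∈ PySem.List.sorted (PySem.Set.ofList (pyLetters.map f)) (fun v => v) true := by
      rw [PySem.List.mem_sorted, PySem.Set.mem_ofList]
      exact List.mem_map_of_mem hx
    have hndK : (PySem.List.sorted (PySem.Set.ofList (pyLetters.map f)) (fun v => v) true).Nodup :=
      ((PySem.List.sorted_perm _ _ _).nodup_iff).mpr (PySem.Set.nodup_ofList _)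
    rw [List.count_eq_one_of_mem hndK hmemK, Nat.mul_one]
  · rw [List.count_eq_zero_of_not_mem hx]
    simp

theorem pv_items_mk {κ ν : Type} [BEq κ] (l : List (κ × ν)) : (PySem.Dict.mk l).items = l := rfl

theorem pv_assemble (f : Char → Int) :
    ((PySem.List.sorted
        (((PySem.Set.ofList (pyLetters.map f)).map
            (fun v => (v, pyLetters.filter (fun c => f c == v)))).map
          (fun p => (p.1, PySem.List.sorted p.2 pyEtaoinFind true)))
        (fun p => p.1) true).foldl (fun acc p => acc ++ [p.2]) []).flatten
      = PySem.List.sorted pyLetters (fun c => 52 * f c + pvFind2 c) true := by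
  have hstep1 : (((PySem.Set.ofList (pyLetters.map f)).map
            (fun v => (v, pyLetters.filter (fun c => f c == v)))).map
          (fun p => (p.1, PySem.List.sorted p.2 pyEtaoinFind true)))
      = (PySem.Set.ofList (pyLetters.map f)).map
          (fun v => (v, PySem.List.sorted (pyLetters.filter (fun c => f c == v)) pyEtaoinFind true)) := by
    rw [List.map_map]
    rfl
  have hstep2 : PySem.List.sorted
        ((PySem.Set.ofList (pyLetters.map f)).map
          (fun v => (v, PySem.List.sorted (pyLetters.filter (fun c => f c == v)) pyEtaoinFind true)))
        (fun p => p.1) true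
      = (PySem.List.sorted (PySem.Set.ofList (pyLetters.map f)) (fun v => v) true).map
          (fun v => (v, PySem.List.sorted (pyLetters.filter (fun c => f c == v)) pyEtaoinFind true)) := by
    apply PySem.List.sorted_rev_eq_of_perm_of_pairwise_gt
    · exact (PySem.List.sorted_perm _ _ _).map _
    · rw [List.pairwise_map]
      exact (pv_K'_strict f).imp (fun h => h)
  rw [hstep1, hstep2]
  rw [PySem.List.foldl_append_singleton_eq_map, List.nil_append, List.map_map]
  exact (PySem.List.sorted_rev_eq_of_perm_of_pairwise_gt pyLetters _ _
    (pv_flatten_perm_letters f) (pv_flatten_pairwise f)).symm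

-- ---- A's getFrequencyOrder, characterised ----

theorem pv_fold_congr (g f : Char → Int) (h : ∀ c ∈ pyLetters, g c = f c) :
    (pyLetters.foldl
        (fun d letter =>
          if d.contains (g letter) = false
          then d.insert (g letter) [letter]
          else d.insert (g letter) (d.getD (g letter) [] ++ [letter]))
        PySem.Dict.empty)
      = pyLetters.foldl (fun d c => d.modify (f c) [] (· ++ [c])) PySem.Dict.empty := by
  apply PySem.List.foldl_congr_mem
  intro d letter hmem
  rw [h letter hmem]
  by_cases hc : d.contains (f letter) = false
  · rw [if_pos hc]
    simp only [PySem.Dict.modify, PySem.Dict.getD_of_not_contains d _ hc, List.nil_append]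
  · rw [if_neg hc]
    rfl

theorem pv_assemble' (f : Char → Int) (its : List (Int × List Char))
    (hits : its = (PySem.Set.ofList (pyLetters.map f)).map
        (fun v => (v, pyLetters.filter (fun c => f c == v)))) :
    ((PySem.List.sorted
        ((PySem.Dict.mk (its.map (fun p => (p.1, PySem.List.sorted p.2 pyEtaoinFind true)))).items)
        (fun p => p.1) true).foldl (fun acc p => acc ++ [p.2]) []).flatten
      = PySem.List.sorted pyLetters (fun c => 52 * f c + pvFind2 c) true := by
  rw [pv_items_mk, hits]
  exact pv_assemble f

theorem pv_freqOrder_gen (g f : Char → Int) (h : ∀ c ∈ pyLetters, g c = f c) :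
    ((PySem.List.sorted
        ((PySem.Dict.mk
            ((pyLetters.foldl
                (fun d letter =>
                  if d.contains (g letter) = false
                  then d.insert (g letter) [letter]
                  else d.insert (g letter) (d.getD (g letter) [] ++ [letter]))
                PySem.Dict.empty).items.map
              (fun p => (p.1, PySem.List.sorted p.2 pyEtaoinFind true)))).items)
        (fun p => p.1) true).foldl (fun acc p => acc ++ [p.2]) []).flatten
      = PySem.List.sorted pyLetters (fun c => 52 * f c + pvFind2 c) true := by
  have hitems : (pyLetters.foldl
        (fun d letter =>
          if d.contains (g letter) = false
          then d.insert (g letter) [letter]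
          else d.insert (g letter) (d.getD (g letter) [] ++ [letter]))
        PySem.Dict.empty).items
      = (PySem.Set.ofList (pyLetters.map f)).map
          (fun v => (v, pyLetters.filter (fun c => f c == v))) := by
    rw [pv_fold_congr g f h]
    exact pv_buckets_items f
  exact pv_assemble' f _ hitems

theorem pv_freqOrder_eq (message : String) :
    pyGetFrequencyOrder message
      = PySem.List.sorted pyLetters (pvKey (PySem.Str.lower message).toList) true :=
  pv_freqOrder_gen (fun letter => (pyGetLetterCount message).getD letter 0)
    (fun c => ((PySem.Str.lower message).toList.count c : Int))
    (fun c hc => pv_letterCount_getD message c hc)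

-- ---- the two scoring styles agree on any frequency order ----

theorem pv_contains_ofList (l : List Char) (c : Char) :
    (PySem.Set.ofList l).contains c = l.contains c := by
  by_cases h : c ∈ l
  · simp [(PySem.Set.mem_ofList l c).mpr h, h]
  · have h2 : c ∉ PySem.Set.ofList l := fun hc => h ((PySem.Set.mem_ofList l c).mp hc)
    simp [h, h2]

theorem pv_half_score (s : List Char) (hset : PySem.Set.ofList s = s) (l : List Char) :
    s.foldl (fun acc c => if l.contains c then acc + 1 else acc) (0 : Int)
      = ((PySem.Set.inter (PySem.Set.ofList s) (PySem.Set.ofList l)).length : Int) := by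
  rw [PySem.List.foldl_if_add_one]
  rw [hset]
  unfold PySem.Set.inter
  have h1 : s.countP (fun c => (PySem.Set.ofList l).contains c) = s.countP (fun c => l.contains c) := by
    apply List.countP_congr
    intro c _
    rw [pv_contains_ofList]
  rw [← List.countP_eq_length_filter, h1]
  have h2 : List.countP l.contains s = List.countP (fun c => decide (c ∈ l)) s := by
    apply List.countP_congr
    intro c _
    simp
  rw [h2]
  simp

theorem pv_score_eq (fo : List Char) :
    ((PySem.List.slice pyEtaoin none (some 6)).foldl
        (fun acc c => if (PySem.List.slice fo none (some 6)).contains c then acc + 1 else acc) (0 : Int))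
      + ((PySem.List.slice pyEtaoin (some (-6)) none).foldl
        (fun acc c => if (PySem.List.slice fo (some (-6)) none).contains c then acc + 1 else acc) (0 : Int))
    = ((PySem.Set.inter (PySem.Set.ofList (PySem.List.slice pyEtaoin none (some 6)))
        (PySem.Set.ofList (PySem.List.slice fo none (some 6)))).length : Int)
      + ((PySem.Set.inter (PySem.Set.ofList (PySem.List.slice pyEtaoin (some (-6)) none))
        (PySem.Set.ofList (PySem.List.slice fo (some (-6)) none))).length : Int) := by
  have e1 : PySem.List.slice pyEtaoin none (some 6) = ['e','t','a','o','i','n'] := by rfl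
  have e2 : PySem.List.slice pyEtaoin (some (-6)) none = ['v','k','j','x','q','z'] := by rfl
  rw [e1, e2]
  rw [pv_half_score ['e','t','a','o','i','n'] (by decide) (PySem.List.slice fo none (some 6))]
  rw [pv_half_score ['v','k','j','x','q','z'] (by decide) (PySem.List.slice fo (some (-6)) none)]

-- ===== VERDICT (by name: the statement is the Claim_ definition above) =====
theorem englishFreqMatchScore_spec : Claim_equal_englishFreqMatchScore := by
  intro message _
  unfold Spec_englishFreqMatchScore
  simp only [englishFreqMatchScore, englishFreqMatchScore_alt, pv_freqOrder_eq, pv_sorted2_eq,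
    ← pv_score_eq]
  rw [PySem.List.foldl_if_add_one, PySem.List.foldl_if_add_one, PySem.List.foldl_if_add_one]
  ring
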